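-- pv_equiv track=rewrite | github.com/akhil151/ai-verse | Data Ingestion/rag/guardrails.py | enforce_answer_safety
-- ===== SOURCE A (Python) =====
-- def enforce_answer_safety(answer):
--     if not answer or answer.strip() == "":
--         return False
--
--     banned_phrases = [
--         "I think",
--         "maybe",
--         "it seems like",
--         "I assume",
--         "might be",
--         "probably",
--         "as an AI I guess",
--     ]
--
--     for phrase in banned_phrases:
--         if phrase.lower() in answer.lower():
--             return False
--
--     return True
-- ===== SOURCE B (Python) =====
-- def enforce_answer_safety(answer):
--     if not answer or answer.strip() == "":
--         return False
--
--     banned = ("i think", "maybe", "it seems like", "i assume",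
--               "might be", "probably", "as an ai i guess")
--     low = answer.lower()
--     # single position-major scan: at each index test whether any banned
--     # phrase starts there, instead of seven separate substring searches
--     return not any(low.startswith(p, i)
--                    for i in range(len(low)) for p in banned)
-- ===== Notes on version B (the rewrite author's own statement) =====
-- stated objective: alternative
-- what changed: Replaces the seven separate phrase-major substring searches of the lowered answer by one position-major left-to-right scan that tests at each index whether any banned phrase starts there.
import Mathlib
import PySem

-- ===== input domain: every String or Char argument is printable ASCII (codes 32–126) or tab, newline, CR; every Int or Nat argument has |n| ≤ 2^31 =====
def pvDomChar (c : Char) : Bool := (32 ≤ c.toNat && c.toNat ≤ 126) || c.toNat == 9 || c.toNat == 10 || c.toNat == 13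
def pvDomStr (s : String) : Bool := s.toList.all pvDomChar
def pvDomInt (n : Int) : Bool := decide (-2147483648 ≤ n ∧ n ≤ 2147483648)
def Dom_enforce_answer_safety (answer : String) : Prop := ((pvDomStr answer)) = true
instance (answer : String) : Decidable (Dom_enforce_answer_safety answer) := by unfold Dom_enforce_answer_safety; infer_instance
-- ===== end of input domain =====

-- B replaces A's seven phrase-major substring searches by one position-major scan over the
-- lowered answer (alternative decomposition, same cost); same return value on all inputs.


-- ===== PORT A =====
-- the banned_phrases list of A, as written
def pvBannedPhrasesA : List String :=
  ["I think", "maybe", "it seems like", "I assume", "might be", "probably", "as an AI I guess"]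

-- 'if not answer or answer.strip() == "": return False'; then the for-loop over the phrases
-- ('return False' on a hit) is the list 'any'; strings handled on .toList via PySem.Chars.
def enforce_answer_safety (answer : String) : Bool :=
  let cs := answer.toList
  if cs.isEmpty || (PySem.Chars.strip cs).isEmpty then false
  else if pvBannedPhrasesA.any
      (fun phrase => PySem.Chars.isIn (PySem.Chars.lower phrase.toList) (PySem.Chars.lower cs))
    then false
  else true

-- ===== PORT B =====
-- Source B's banned tuple (already lowercase)
def pvBannedLow : List (List Char) :=
  ["i think".toList, "maybe".toList, "it seems like".toList, "i assume".toList,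
   "might be".toList, "probably".toList, "as an ai i guess".toList]

-- 'any(low.startswith(p, i) for i in range(len(low)) for p in banned)':
-- position-major scan over the suffixes of the lowered answer
def pvScan : List Char → Bool
  | [] => false
  | c :: rest => pvBannedLow.any (fun p => p.isPrefixOf (c :: rest)) || pvScan rest

def enforce_answer_safety_alt (answer : String) : Bool :=
  let cs := answer.toList
  if cs.isEmpty || (PySem.Chars.strip cs).isEmpty then false
  else !pvScan (PySem.Chars.lower cs)

-- ===== PRECONDITION & SPEC =====
def Spec_enforce_answer_safety (answer : String) (out : Bool) : Prop := out = enforce_answer_safety_alt answer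
instance (answer : String) (out : Bool) : Decidable (Spec_enforce_answer_safety answer out) := by unfold Spec_enforce_answer_safety; infer_instance

-- ===== CLAIM (what is proved, stated in full; the proofs are below) =====
def Claim_equal_enforce_answer_safety : Prop := ∀ (answer : String), Dom_enforce_answer_safety answer → Spec_enforce_answer_safety answer (enforce_answer_safety answer)

-- ===== LEMMAS AND PROOFS =====

-- 'sub in (c :: cs)': either sub starts at position 0 or it occurs in the tail
theorem pv_isIn_cons (p : List Char) (c : Char) (cs : List Char) :
    PySem.Chars.isIn p (c :: cs) = (p.isPrefixOf (c :: cs) || PySem.Chars.isIn p cs) := by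
  rw [Bool.eq_iff_iff]
  simp [PySem.Chars.isIn_iff_infix, List.infix_cons_iff, List.isPrefixOf_iff_prefix]

-- the position-major scan finds exactly the same hits as the seven substring searches
theorem pv_scan_eq (cs : List Char) :
    pvScan cs = pvBannedLow.any (fun p => PySem.Chars.isIn p cs) := by
  induction cs with
  | nil => decide
  | cons c rest ih =>
      simp only [pvScan, ih, pvBannedLow, List.any_cons, List.any_nil, pv_isIn_cons]
      cases h1 : "i think".toList.isPrefixOf (c :: rest) <;>
        cases h2 : "maybe".toList.isPrefixOf (c :: rest) <;>
        cases h3 : "it seems like".toList.isPrefixOf (c :: rest) <;>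
        cases h4 : "i assume".toList.isPrefixOf (c :: rest) <;>
        cases h5 : "might be".toList.isPrefixOf (c :: rest) <;>
        cases h6 : "probably".toList.isPrefixOf (c :: rest) <;>
        cases h7 : "as an ai i guess".toList.isPrefixOf (c :: rest) <;> simp

-- A's runtime-lowered phrases are B's lowercase literals
theorem pv_lowered_phrases :
    pvBannedPhrasesA.map (fun phrase => PySem.Chars.lower phrase.toList) = pvBannedLow := by
  decide

-- ===== VERDICT (by name: the statement is the Claim_ definition above) =====
theorem enforce_answer_safety_spec : Claim_equal_enforce_answer_safety := by
  intro answer _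
  unfold Spec_enforce_answer_safety enforce_answer_safety enforce_answer_safety_alt
  by_cases h : answer.toList.isEmpty || (PySem.Chars.strip answer.toList).isEmpty
  · simp [h]
  · simp only [h, Bool.false_eq_true, if_false]
    rw [pv_scan_eq, ← pv_lowered_phrases, List.any_map]
    simp only [Function.comp_def]
    cases hb : pvBannedPhrasesA.any
        (fun phrase => PySem.Chars.isIn (PySem.Chars.lower phrase.toList)
          (PySem.Chars.lower answer.toList)) <;>
      simp
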